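-- pv_equiv track=rewrite | github.com/simmarum/AdventOfCode | 2016/day-07/main.py | part_1
-- ===== SOURCE A (Python) =====
-- from operator import xor
--
-- def find_palindrom_4(s):
--     for i in range(0, len(s) - 3):
--         if (s[i] != s[i + 1]) and (s[i] ==
--                                    s[i + 3]) and (s[i + 1] == s[i + 2]):
--             return True
--     return False
--
-- def part_1(inp):
--     good_ips = 0
--     for line in inp:
--         line_words = []
--         tmp_word = ''
--         for c in line:
--             if c == '[':
--                 line_words.append((True, tmp_word))
--                 tmp_word = ''
--             elif c == ']':
--                 line_words.append((False, tmp_word))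
--                 tmp_word = ''
--             else:
--                 tmp_word += c
--         line_words.append((True, tmp_word))
--         new_line_word = []
--         for word in line_words:
--             has_palindrom = find_palindrom_4(word[1])
--             good_combination = not(xor(has_palindrom, word[0]))
--             new_line_word.append((word[0], word[1], good_combination))
--         if any([word[2] for word in new_line_word if word[0] is True]) and all(
--                 [word[2] for word in new_line_word if word[0] is False]):
--             good_ips += 1
--
--     return good_ips
-- ===== SOURCE B (Python) =====
-- def has_abba(s):
--     while len(s) >= 4:
--         if s[0] != s[1] and s[0] == s[3] and s[1] == s[2]:
--             return True
--         s = s[1:]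
--     return False
--
-- def part_1(inp):
--     count = 0
--     for line in inp:
--         good = False
--         bad = False
--         cur = ''
--         for c in line:
--             if c == '[':
--                 good = good or has_abba(cur)
--                 cur = ''
--             elif c == ']':
--                 bad = bad or has_abba(cur)
--                 cur = ''
--             else:
--                 cur += c
--         if (good or has_abba(cur)) and not bad:
--             count += 1
--     return count
-- ===== Notes on version B (the rewrite author's own statement) =====
-- stated objective: simpler
-- what changed: B replaces A's three per-line passes (build a (flag,word) list, map it to (flag,word,good) tuples via xor, then any/all over two filtered comprehensions) with a single streaming pass that keeps just two booleans (supernet-ABBA seen, hypernet-ABBA seen), and replaces the index-range ABBA scan with a sliding-window scan over suffixes.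
import Mathlib
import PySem

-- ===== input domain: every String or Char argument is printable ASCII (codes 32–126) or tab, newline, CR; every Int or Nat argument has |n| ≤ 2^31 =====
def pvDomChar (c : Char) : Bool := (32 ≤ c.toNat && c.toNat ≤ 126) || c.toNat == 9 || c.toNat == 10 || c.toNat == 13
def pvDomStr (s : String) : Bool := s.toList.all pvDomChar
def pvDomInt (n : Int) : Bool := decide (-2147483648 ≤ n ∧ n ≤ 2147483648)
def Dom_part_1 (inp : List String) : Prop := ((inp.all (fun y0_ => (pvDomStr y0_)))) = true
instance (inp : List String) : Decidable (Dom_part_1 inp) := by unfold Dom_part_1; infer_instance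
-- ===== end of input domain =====

-- B replaces A's three per-line passes (build (flag,word) list, map to (flag,word,good) with xor, then any/all
-- over filtered lists) with a single streaming pass keeping two flags, and a sliding-window ABBA scan; objective: simpler.

-- ===== PORT A =====
-- words are kept as List Char (Python builds them char-by-char)
def find_palindrom_4 (cs : List Char) : Bool :=
  (List.range (cs.length - 3)).any (fun i =>
    (cs.getD i ' ' != cs.getD (i+1) ' ') && (cs.getD i ' ' == cs.getD (i+3) ' ')
      && (cs.getD (i+1) ' ' == cs.getD (i+2) ' '))

def part_1 (inp : List String) : Int :=
  inp.foldl (fun good_ips line =>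
    let st := line.toList.foldl (fun (p : List (Bool × List Char) × List Char) c =>
      if c = '[' then (p.1 ++ [(true, p.2)], [])
      else if c = ']' then (p.1 ++ [(false, p.2)], [])
      else (p.1, p.2 ++ [c])) ([], [])
    let line_words := st.1 ++ [(true, st.2)]
    let new_line_word := line_words.map (fun w => (w.1, w.2, !(Bool.xor (find_palindrom_4 w.2) w.1)))
    if ((new_line_word.filter (fun w => w.1 == true)).map (fun w => w.2.2)).any id
        && ((new_line_word.filter (fun w => w.1 == false)).map (fun w => w.2.2)).all id
    then good_ips + 1 else good_ips) 0

-- ===== PORT B =====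
def hasAbba : List Char → Bool
  | a :: b :: c :: d :: rest => ((a != b) && (a == d) && (b == c)) || hasAbba (b :: c :: d :: rest)
  | _ => false

def part_1_alt (inp : List String) : Int :=
  inp.foldl (fun count line =>
    let st := line.toList.foldl (fun (p : Bool × Bool × List Char) c =>
      if c = '[' then (p.1 || hasAbba p.2.2, p.2.1, [])
      else if c = ']' then (p.1, p.2.1 || hasAbba p.2.2, [])
      else (p.1, p.2.1, p.2.2 ++ [c])) (false, false, [])
    if (st.1 || hasAbba st.2.2) && !st.2.1 then count + 1 else count) 0

-- ===== PRECONDITION & SPEC =====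
def Spec_part_1 (inp : List String) (out : Int) : Prop := out = part_1_alt inp
instance (inp : List String) (out : Int) : Decidable (Spec_part_1 inp out) := by unfold Spec_part_1; infer_instance

-- ===== CLAIM (what is proved, stated in full; the proofs are below) =====
def Claim_equal_part_1 : Prop := ∀ (inp : List String), Dom_part_1 inp → Spec_part_1 inp (part_1 inp)

-- ===== LEMMAS AND PROOFS =====

theorem any_range_shift (n : Nat) (f : Nat → Bool) :
    (List.range (n+1)).any f = (f 0 || (List.range n).any (fun i => f (i+1))) := by
  simp only [List.range_succ_eq_map, List.any_cons, List.any_map]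
  rfl

-- A's range-indexed ABBA scan equals B's sliding-window scan
theorem fp_eq (cs : List Char) : find_palindrom_4 cs = hasAbba cs := by
  induction cs with
  | nil => simp [find_palindrom_4, hasAbba]
  | cons a tl ih =>
    rcases tl with _ | ⟨b, _ | ⟨c, _ | ⟨d, rest⟩⟩⟩
    · simp [find_palindrom_4, hasAbba]
    · simp [find_palindrom_4, hasAbba]
    · simp [find_palindrom_4, hasAbba]
    · have hl : (a :: b :: c :: d :: rest).length - 3 = rest.length + 1 := by simp
      have hl2 : (b :: c :: d :: rest).length - 3 = rest.length := by simp
      rw [find_palindrom_4, hl, any_range_shift]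
      rw [find_palindrom_4, hl2] at ih
      simp only [List.getD_cons_succ, List.getD_cons_zero] at ih ⊢
      rw [ih]
      simp [hasAbba]

def anyT (ws : List (Bool × List Char)) : Bool := ws.any (fun w => w.1 && find_palindrom_4 w.2)
def anyF (ws : List (Bool × List Char)) : Bool := ws.any (fun w => !w.1 && find_palindrom_4 w.2)

theorem any_comp_enrich (ws : List (Bool × List Char)) :
    ws.any ((fun a => a.1 && a.2.2) ∘ fun w => ((w.1 : Bool), w.2, !(Bool.xor (hasAbba w.2) w.1)))
    = ws.any (fun w => w.1 && hasAbba w.2) := by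
  induction ws with
  | nil => rfl
  | cons w ws ih => rcases w with ⟨fl, word⟩; cases fl <;> simp [ih, Function.comp]

theorem all_comp_enrich (ws : List (Bool × List Char)) :
    ws.all ((fun a => a.1 || a.2.2) ∘ fun w => ((w.1 : Bool), w.2, !(Bool.xor (hasAbba w.2) w.1)))
    = !ws.any (fun w => !w.1 && hasAbba w.2) := by
  induction ws with
  | nil => rfl
  | cons w ws ih => rcases w with ⟨fl, word⟩; cases fl <;> simp [ih, Function.comp]

theorem anyPart_eq (tmp : List Char) (ws : List (Bool × List Char)) :
    ((((ws ++ [(true, tmp)]).map (fun w => (w.1, w.2, !(Bool.xor (find_palindrom_4 w.2) w.1)))).filter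
        (fun w => w.1 == true)).map (fun w => w.2.2)).any id
    = (anyT ws || hasAbba tmp) := by
  induction ws with
  | nil => simp [anyT, fp_eq]
  | cons w ws ih =>
    rcases w with ⟨fl, word⟩
    cases fl
    · simpa [List.filter_cons, anyT] using ih
    · simp only [List.cons_append, List.map_cons, List.filter_cons] at ih ⊢
      simp only [anyT, List.any_cons] at ih ⊢
      simp [Bool.or_assoc, any_comp_enrich, fp_eq]

theorem allPart_eq (tmp : List Char) (ws : List (Bool × List Char)) :
    ((((ws ++ [(true, tmp)]).map (fun w => (w.1, w.2, !(Bool.xor (find_palindrom_4 w.2) w.1)))).filter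
        (fun w => w.1 == false)).map (fun w => w.2.2)).all id
    = !anyF ws := by
  induction ws with
  | nil => simp [anyF]
  | cons w ws ih =>
    rcases w with ⟨fl, word⟩
    cases fl
    · simp only [List.cons_append, List.map_cons, List.filter_cons] at ih ⊢
      simp only [anyF, List.any_cons] at ih ⊢
      simp [all_comp_enrich, fp_eq]
    · simpa [List.filter_cons, anyF] using ih

-- the per-line fold invariant relating A's word list to B's two flags
theorem fold_inv (cs : List Char) : ∀ (ws : List (Bool × List Char)) (tmp : List Char),
    cs.foldl (fun (p : Bool × Bool × List Char) c =>
      if c = '[' then (p.1 || hasAbba p.2.2, p.2.1, [])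
      else if c = ']' then (p.1, p.2.1 || hasAbba p.2.2, [])
      else (p.1, p.2.1, p.2.2 ++ [c])) (anyT ws, anyF ws, tmp)
    = (let st := cs.foldl (fun (p : List (Bool × List Char) × List Char) c =>
        if c = '[' then (p.1 ++ [(true, p.2)], [])
        else if c = ']' then (p.1 ++ [(false, p.2)], [])
        else (p.1, p.2 ++ [c])) (ws, tmp)
       (anyT st.1, anyF st.1, st.2)) := by
  induction cs with
  | nil => intro ws tmp; rfl
  | cons ch cs ih =>
    intro ws tmp
    by_cases h1 : ch = '['
    · have h2 : anyT (ws ++ [(true, tmp)]) = (anyT ws || hasAbba tmp) := by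
        simp [anyT, fp_eq]
      have h3 : anyF (ws ++ [(true, tmp)]) = anyF ws := by simp [anyF]
      simp only [List.foldl_cons, if_pos h1]
      rw [← h2, ← h3, ih]
    · by_cases h2 : ch = ']'
      · have h3 : anyF (ws ++ [(false, tmp)]) = (anyF ws || hasAbba tmp) := by
          simp [anyF, fp_eq]
        have h4 : anyT (ws ++ [(false, tmp)]) = anyT ws := by simp [anyT]
        simp only [List.foldl_cons, if_neg h1, if_pos h2]
        rw [← h3, ← h4, ih]
      · simp only [List.foldl_cons, if_neg h1, if_neg h2]
        rw [ih]

theorem line_eq (line : String) :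
    ((let st := line.toList.foldl (fun (p : Bool × Bool × List Char) c =>
        if c = '[' then (p.1 || hasAbba p.2.2, p.2.1, [])
        else if c = ']' then (p.1, p.2.1 || hasAbba p.2.2, [])
        else (p.1, p.2.1, p.2.2 ++ [c])) (false, false, [])
      (st.1 || hasAbba st.2.2) && !st.2.1) : Bool)
    = (let st := line.toList.foldl (fun (p : List (Bool × List Char) × List Char) c =>
        if c = '[' then (p.1 ++ [(true, p.2)], [])
        else if c = ']' then (p.1 ++ [(false, p.2)], [])
        else (p.1, p.2 ++ [c])) ([], [])
       let line_words := st.1 ++ [(true, st.2)]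
       let new_line_word := line_words.map (fun w => (w.1, w.2, !(Bool.xor (find_palindrom_4 w.2) w.1)))
       (((new_line_word.filter (fun w => w.1 == true)).map (fun w => w.2.2)).any id
         && ((new_line_word.filter (fun w => w.1 == false)).map (fun w => w.2.2)).all id)) := by
  have h0 : (false, false, ([] : List Char))
      = (anyT [], anyF [], ([] : List Char)) := by rfl
  rw [h0, fold_inv line.toList [] []]
  simp only []
  rw [anyPart_eq, allPart_eq]

theorem folds_eq (inp : List String) : ∀ (acc : Int),
    inp.foldl (fun good_ips line =>
      let st := line.toList.foldl (fun (p : List (Bool × List Char) × List Char) c =>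
        if c = '[' then (p.1 ++ [(true, p.2)], [])
        else if c = ']' then (p.1 ++ [(false, p.2)], [])
        else (p.1, p.2 ++ [c])) ([], [])
      let line_words := st.1 ++ [(true, st.2)]
      let new_line_word := line_words.map (fun w => (w.1, w.2, !(Bool.xor (find_palindrom_4 w.2) w.1)))
      if (((new_line_word.filter (fun w => w.1 == true)).map (fun w => w.2.2)).any id
          && ((new_line_word.filter (fun w => w.1 == false)).map (fun w => w.2.2)).all id)
      then good_ips + 1 else good_ips) acc
    = inp.foldl (fun count line =>
      let st := line.toList.foldl (fun (p : Bool × Bool × List Char) c =>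
        if c = '[' then (p.1 || hasAbba p.2.2, p.2.1, [])
        else if c = ']' then (p.1, p.2.1 || hasAbba p.2.2, [])
        else (p.1, p.2.1, p.2.2 ++ [c])) (false, false, [])
      if ((st.1 || hasAbba st.2.2) && !st.2.1) then count + 1 else count) acc := by
  induction inp with
  | nil => intro acc; rfl
  | cons line rest ih =>
    intro acc
    simp only [List.foldl_cons]
    rw [← line_eq line, ih]

-- ===== VERDICT (by name: the statement is the Claim_ definition above) =====
theorem part_1_spec : Claim_equal_part_1 := by
  intro inp _
  unfold Spec_part_1 part_1 part_1_alt
  exact folds_eq inp 0
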